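-- pv_equiv track=rewrite | github.com/hancandice/python_p | Jump_to_python/candice/practice_last.py | check
-- ===== SOURCE A (Python) =====
-- def check(numbers):
--     x = list(map(int,str(numbers)))
--     if len(x)==10:
--         for n in range(10):
--             try:
--                 x.remove(n)
--             except ValueError:
--                 pass
--         if x==[]:
--             return True
--         else:
--             return False
--     else:
--         return False
-- ===== SOURCE B (Python) =====
-- def check(numbers):
--     return sorted(map(int, str(numbers))) == list(range(10))
-- ===== Notes on version B (the rewrite author's own statement) =====
-- stated objective: simpler
-- what changed: Replaces A's loop of ten try/except list.remove calls and empty-list test with a single sort of the digit list compared against list(range(10)).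
import Mathlib
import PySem

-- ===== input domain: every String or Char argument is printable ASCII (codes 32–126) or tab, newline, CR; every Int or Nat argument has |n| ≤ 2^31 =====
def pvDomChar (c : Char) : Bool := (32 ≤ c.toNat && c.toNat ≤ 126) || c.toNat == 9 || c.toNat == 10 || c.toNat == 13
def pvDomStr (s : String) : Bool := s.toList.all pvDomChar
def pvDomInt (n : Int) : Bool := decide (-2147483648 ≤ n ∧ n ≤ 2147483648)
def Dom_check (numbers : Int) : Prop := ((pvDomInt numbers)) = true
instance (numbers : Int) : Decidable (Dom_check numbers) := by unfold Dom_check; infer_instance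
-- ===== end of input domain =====

-- B replaces A's loop of ten try/except list.remove calls with sorting the digit
-- list once and comparing it to list(range(10)) (objective: simpler).

-- ===== PORT A =====
-- list(map(int, str(numbers))) — shared by both Pythons verbatim.  int(c) on a
-- single character is PySem.Int.ofStr?; '.getD 0' only totalizes it (Pre_check
-- keeps numbers ≥ 0, so every character of str(numbers) is a digit and parses).
def pyDigits (numbers : Int) : List Int :=
  (PySem.Int.toChars numbers).map (fun c => (PySem.Int.ofStr? (String.ofList [c])).getD 0)

-- x.remove(n) inside try/except ValueError: pass
def pvRemoveStep (x : List Int) (n : Int) : List Int :=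
  match PySem.List.remove? x n with
  | some r => r
  | none => x

def check (numbers : Int) : Bool :=
  let x := pyDigits numbers
  if x.length = 10 then
    let x := (PySem.List.pyRange 0 10 1).foldl pvRemoveStep x
    if x = [] then true else false
  else false

-- ===== PORT B =====
def check_alt (numbers : Int) : Bool :=
  decide (PySem.List.sorted (pyDigits numbers) (fun d => d) false = PySem.List.pyRange 0 10 1)

-- ===== PRECONDITION & SPEC =====
-- Pre_ excludes negative inputs: str(numbers) then starts with '-' and int('-')
-- raises ValueError in both A and B.
def Pre_check (numbers : Int) : Prop := 0 ≤ numbers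
instance (numbers : Int) : Decidable (Pre_check numbers) := by unfold Pre_check; infer_instance
def pvWitness_check : Int := (1023456789)

def Spec_check (numbers : Int) (out : Bool) : Prop := out = check_alt numbers
instance (numbers : Int) (out : Bool) : Decidable (Spec_check numbers out) := by unfold Spec_check; infer_instance

-- ===== CLAIM (what is proved, stated in full; the proofs are below) =====
def Claim_equal_check : Prop := ∀ (numbers : Int), Dom_check numbers → Pre_check numbers → Spec_check numbers (check numbers)

-- ===== LEMMAS AND PROOFS =====

theorem pvRemoveStep_eq (x : List Int) (n : Int) :
    pvRemoveStep x n = if n ∈ x then x.erase n else x := by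
  by_cases h : n ∈ x
  · simp [pvRemoveStep, PySem.List.remove?_eq_some_erase x n h, h]
  · simp [pvRemoveStep, (PySem.List.remove?_eq_none_iff x n).mpr h, h]

-- removing each member of a nodup list a permutation-equal list consists of empties it
theorem pv_foldl_remove_of_perm (ns : List Int) :
    ∀ x : List Int, ns.Nodup → x.Perm ns → ns.foldl pvRemoveStep x = [] := by
  induction ns with
  | nil => intro x _ hp; simpa using hp.eq_nil
  | cons n ns ih =>
      intro x hnd hp
      have hn : n ∈ x := hp.mem_iff.mpr (List.mem_cons_self ..)
      have hnd' := hnd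
      rw [List.nodup_cons] at hnd'
      have hperm : (x.erase n).Perm ns := by
        have := hp.erase n
        rwa [List.erase_cons_head] at this
      simp only [List.foldl_cons, pvRemoveStep_eq, hn, if_pos]
      exact ih (x.erase n) hnd'.2 hperm

-- if the removal loop empties x, x was a sub-permutation of the removed values
theorem pv_foldl_remove_subperm (ns : List Int) :
    ∀ x : List Int, ns.foldl pvRemoveStep x = [] → x.Subperm ns := by
  induction ns with
  | nil => intro x h; simp at h; simp [h]
  | cons n ns ih =>
      intro x h
      simp only [List.foldl_cons] at h
      have hsub := ih _ h
      by_cases hn : n ∈ x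
      · rw [pvRemoveStep_eq, if_pos hn] at hsub
        have hperm : x.Perm (n :: x.erase n) := List.perm_cons_erase hn
        obtain ⟨m, hm, hs⟩ := hsub
        exact hperm.subperm.trans ⟨n :: m, hm.cons n, hs.cons_cons n⟩
      · rw [pvRemoveStep_eq, if_neg hn] at hsub
        exact hsub.trans (List.sublist_cons_self n ns).subperm

theorem pv_body_eq (x : List Int) :
    (if x.length = 10 then
      (if (PySem.List.pyRange 0 10 1).foldl pvRemoveStep x = [] then true else false)
     else false)
    = decide (PySem.List.sorted x (fun d => d) false = PySem.List.pyRange 0 10 1) := by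
  have hlenR : (PySem.List.pyRange 0 10 1).length = 10 := by
    simp [PySem.List.length_pyRange_one]
  by_cases hlen : x.length = 10
  · simp only [hlen, if_true]
    by_cases hperm : x.Perm (PySem.List.pyRange 0 10 1)
    · have h1 : (PySem.List.pyRange 0 10 1).foldl pvRemoveStep x = [] :=
        pv_foldl_remove_of_perm _ x (PySem.List.nodup_pyRange_one 0 10) hperm
      have h2 : PySem.List.sorted x (fun d => d) false = PySem.List.pyRange 0 10 1 :=
        PySem.List.sorted_eq_of_perm_of_pairwise_lt x _ _ hperm.symm
          (PySem.List.pairwise_lt_pyRange_one 0 10)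
      simp [h1, h2]
    · have h1 : ¬ (PySem.List.pyRange 0 10 1).foldl pvRemoveStep x = [] := by
        intro h
        exact hperm ((pv_foldl_remove_subperm _ x h).perm_of_length_le (by omega))
      have h2 : ¬ PySem.List.sorted x (fun d => d) false = PySem.List.pyRange 0 10 1 := by
        intro h
        exact hperm ((h ▸ PySem.List.sorted_perm x (fun d => d) false).symm)
      simp [h1, h2]
  · have h2 : ¬ PySem.List.sorted x (fun d => d) false = PySem.List.pyRange 0 10 1 := by
      intro h
      have := congrArg List.length h
      rw [PySem.List.length_sorted, hlenR] at this
      exact hlen this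
    simp [hlen, h2]

-- ===== VERDICT (by name: the statement is the Claim_ definition above) =====
theorem check_spec : Claim_equal_check := by
  intro numbers _ _
  unfold Spec_check check check_alt
  exact pv_body_eq (pyDigits numbers)
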